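-- pv_equiv track=rewrite | github.com/kelhad00/CBA-toolkit | interaction_analysis.py | get_next_n_exp
-- ===== SOURCE A (Python) =====
-- def get_next_n_exp(lst, n, max_distance, append_none = True):
--     dct = {}
--     for l in range(len(lst)-n):#skip the last n elements (cannot assume they are None)
--         lab = lst[l][2]
--         if lab not in dct:
--             dct[lab] = []
--         temp = []
--         for ind_next in range(1,n+1):
--             next_close = lst[l+ind_next-1][1]
--             next_far = lst[l+ind_next][0]
--             if (next_far-next_close)<=max_distance:
--                 temp.append(lst[l+ind_next][2])
--             else:
--                 if append_none:
--                     temp.extend([None]*(n-ind_next+1))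
--                 break
--         if len(temp)==n:
--             dct[lab].append(temp)
--     return dct
-- ===== SOURCE B (Python) =====
-- def get_next_n_exp(lst, n, max_distance, append_none=True):
--     m = len(lst)
--     # run[i] = length of the run of consecutive "close" gaps starting at gap i
--     run = [0] * m
--     for i in range(m - 2, -1, -1):
--         if lst[i + 1][0] - lst[i][1] <= max_distance:
--             run[i] = run[i + 1] + 1
--     dct = {}
--     for l in range(m - n):
--         lab = lst[l][2]
--         rows = dct.setdefault(lab, [])
--         r = min(run[l], n)
--         if r == n:
--             rows.append([lst[l + j][2] for j in range(1, n + 1)])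
--         elif append_none:
--             rows.append([lst[l + j][2] for j in range(1, r + 1)] + [None] * (n - r))
--     return dct
-- ===== Notes on version B (the rewrite author's own statement) =====
-- stated objective: alternative
-- what changed: Replaces A's per-element inner break-loop over gaps by a run-length table of consecutive close gaps computed in one backward pass, after which each row is produced by slicing/padding from min(run[l], n) with no inner conditional scan.
import Mathlib
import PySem

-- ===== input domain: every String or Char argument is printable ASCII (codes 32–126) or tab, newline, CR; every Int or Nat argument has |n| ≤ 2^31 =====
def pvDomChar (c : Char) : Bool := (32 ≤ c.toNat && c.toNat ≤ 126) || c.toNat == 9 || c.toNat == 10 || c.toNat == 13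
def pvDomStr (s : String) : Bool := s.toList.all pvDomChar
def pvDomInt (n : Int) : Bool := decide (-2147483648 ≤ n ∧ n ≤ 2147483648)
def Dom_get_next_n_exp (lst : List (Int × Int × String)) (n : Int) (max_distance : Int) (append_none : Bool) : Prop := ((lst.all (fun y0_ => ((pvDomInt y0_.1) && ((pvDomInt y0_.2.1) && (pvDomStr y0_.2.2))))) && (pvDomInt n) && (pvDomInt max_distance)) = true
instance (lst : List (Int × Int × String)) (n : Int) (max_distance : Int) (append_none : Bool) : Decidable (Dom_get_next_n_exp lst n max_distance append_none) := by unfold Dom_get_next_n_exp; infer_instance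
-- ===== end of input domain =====

-- B replaces A's per-element break-loop over gaps by a single backward run-length pass plus slicing/padding (alternative decomposition, same asymptotic cost).


-- ===== PORT A =====
-- list indexing; all indices used by either port are in range under Pre_ (0 ≤ n), so the default is never read there
def pvIdx (lst : List (Int × Int × String)) (i : Nat) : Int × Int × String := lst.getD i (0, 0, "")

-- A's inner loop `for ind_next in range(1, n+1): ... else/break`, carried accumulator temp
def innerA (lst : List (Int × Int × String)) (l nN : Nat) (max_distance : Int)
    (append_none : Bool) (ind : Nat) (temp : List (Option String)) : List (Option String) :=
  if _h : ind ≤ nN then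
    let next_close := (pvIdx lst (l + ind - 1)).2.1
    let next_far := (pvIdx lst (l + ind)).1
    if next_far - next_close ≤ max_distance then
      innerA lst l nN max_distance append_none (ind + 1) (temp ++ [some (pvIdx lst (l + ind)).2.2])
    else if append_none then temp ++ List.replicate (nN - ind + 1) none else temp
  else temp
termination_by nN + 1 - ind

def get_next_n_exp (lst : List (Int × Int × String)) (n : Int) (max_distance : Int) (append_none : Bool) : List (String × List (List (Option String))) :=
  ((PySem.List.pyRange 0 ((lst.length : Int) - n) 1).foldl (fun dct l =>
      let li := l.toNat
      let lab := (pvIdx lst li).2.2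
      let dct := if PySem.Dict.contains dct lab then dct else PySem.Dict.insert dct lab []
      let temp := innerA lst li n.toNat max_distance append_none 1 []
      if (temp.length : Int) = n then PySem.Dict.modify dct lab [] (fun v => v ++ [temp]) else dct)
    (PySem.Dict.empty : PySem.Dict String (List (List (Option String))))).items

-- ===== PORT B =====
-- the comprehension `[lst[l+j][2] for j in range(1, r+1)]` (as Option values)
def pvLabels (lst : List (Int × Int × String)) (s r : Nat) : List (Option String) :=
  (List.range r).map (fun j => some (pvIdx lst (s + j)).2.2)

-- Source B's backward pass filling run[i] (structural recursion from the tail, as the index loop runs m-2 .. 0)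
def runTable (lst : List (Int × Int × String)) (max_distance : Int) : List Nat :=
  match lst with
  | [] => []
  | [_] => [0]
  | a :: b :: t =>
      let rs := runTable (b :: t) max_distance
      (if b.1 - a.2.1 ≤ max_distance then rs.headD 0 + 1 else 0) :: rs

def get_next_n_exp_alt (lst : List (Int × Int × String)) (n : Int) (max_distance : Int) (append_none : Bool) : List (String × List (List (Option String))) :=
  let run := runTable lst max_distance
  ((PySem.List.pyRange 0 ((lst.length : Int) - n) 1).foldl (fun dct l =>
      let li := l.toNat
      let lab := (pvIdx lst li).2.2
      let dct := PySem.Dict.setdefault dct lab []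
      let r := min (run.getD li 0) n.toNat
      if r = n.toNat then
        PySem.Dict.modify dct lab [] (fun v => v ++ [pvLabels lst (li + 1) n.toNat])
      else if append_none then
        PySem.Dict.modify dct lab [] (fun v => v ++ [pvLabels lst (li + 1) r ++ List.replicate (n.toNat - r) none])
      else dct)
    (PySem.Dict.empty : PySem.Dict String (List (List (Option String))))).items

-- ===== PRECONDITION & SPEC =====
-- Python A raises IndexError for every n < 0 (the outer range then runs past the end of lst); it returns normally whenever 0 ≤ n.
def Pre_get_next_n_exp (lst : List (Int × Int × String)) (n : Int) (max_distance : Int) (append_none : Bool) : Prop := 0 ≤ n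
instance (lst : List (Int × Int × String)) (n : Int) (max_distance : Int) (append_none : Bool) : Decidable (Pre_get_next_n_exp lst n max_distance append_none) := by unfold Pre_get_next_n_exp; infer_instance
def pvWitness_get_next_n_exp : (List (Int × Int × String)) × Int × Int × Bool := ([(0, 1, "a"), (2, 3, "b"), (9, 9, "c")], 1, 4, true)

def Spec_get_next_n_exp (lst : List (Int × Int × String)) (n : Int) (max_distance : Int) (append_none : Bool) (out : List (String × List (List (Option String)))) : Prop := out = get_next_n_exp_alt lst n max_distance append_none
instance (lst : List (Int × Int × String)) (n : Int) (max_distance : Int) (append_none : Bool) (out : List (String × List (List (Option String)))) : Decidable (Spec_get_next_n_exp lst n max_distance append_none out) := by unfold Spec_get_next_n_exp; infer_instance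

-- ===== CLAIM (what is proved, stated in full; the proofs are below) =====
def Claim_equal_get_next_n_exp : Prop := ∀ (lst : List (Int × Int × String)) (n : Int) (max_distance : Int) (append_none : Bool), Dom_get_next_n_exp lst n max_distance append_none → Pre_get_next_n_exp lst n max_distance append_none → Spec_get_next_n_exp lst n max_distance append_none (get_next_n_exp lst n max_distance append_none)

-- ===== LEMMAS AND PROOFS =====

-- proof-side characterisation of the run table: run of consecutive close gaps starting at gap i
def runSpec (lst : List (Int × Int × String)) (md : Int) (i : Nat) : Nat :=
  if _h : i + 1 < lst.length then
    (if (pvIdx lst (i + 1)).1 - (pvIdx lst i).2.1 ≤ md then runSpec lst md (i + 1) + 1 else 0)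
  else 0
termination_by lst.length - i

lemma pvIdx_cons (x : Int × Int × String) (rest : List (Int × Int × String)) (i : Nat) :
    pvIdx (x :: rest) (i + 1) = pvIdx rest i := by
  simp [pvIdx]

lemma runSpec_cons (x : Int × Int × String) (rest : List (Int × Int × String)) (md : Int) :
    ∀ i, runSpec (x :: rest) md (i + 1) = runSpec rest md i := by
  have H : ∀ k i, rest.length ≤ i + k → runSpec (x :: rest) md (i + 1) = runSpec rest md i := by
    intro k
    induction k with
    | zero =>
      intro i h
      unfold runSpec
      rw [dif_neg (by simp; omega), dif_neg (by omega)]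
    | succ k ih =>
      intro i h
      unfold runSpec
      by_cases hc : i + 1 < rest.length
      · rw [dif_pos (by simp; omega), dif_pos hc, pvIdx_cons, pvIdx_cons]
        rw [ih (i + 1) (by omega)]
      · rw [dif_neg (by simp; omega), dif_neg (by omega)]
  exact fun i => H rest.length i (by omega)

lemma runTable_getD (md : Int) : ∀ (lst : List (Int × Int × String)) (i : Nat),
    (runTable lst md).getD i 0 = runSpec lst md i := by
  intro lst
  induction lst with
  | nil => intro i; unfold runSpec; simp [runTable]
  | cons a rest ih =>
    intro i
    match rest with
    | [] =>
      unfold runSpec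
      rcases i with _ | j <;> simp [runTable]
    | b :: t =>
      rcases i with _ | j
      · have hhead : (runTable (b :: t) md).head?.getD 0 = runSpec (b :: t) md 0 := by
          have := ih 0
          rcases h : runTable (b :: t) md with _ | ⟨y, ys⟩ <;> simp [h] at this ⊢ <;> exact this
        unfold runSpec
        rw [dif_pos (by simp)]
        simp only [runTable, pvIdx_cons]
        rcases em (b.1 - a.2.1 ≤ md) with hg | hg
        · rw [if_pos hg]
          show _ = (if (pvIdx (b :: t) 0).1 - (pvIdx (a :: b :: t) 0).2.1 ≤ md then runSpec (a :: b :: t) md 1 + 1 else 0)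
          rw [runSpec_cons]
          simp [pvIdx, hg, hhead]
        · rw [if_neg hg]
          show _ = (if (pvIdx (b :: t) 0).1 - (pvIdx (a :: b :: t) 0).2.1 ≤ md then runSpec (a :: b :: t) md 1 + 1 else 0)
          simp [pvIdx, hg]
      · show (runTable (b :: t) md).getD j 0 = _
        rw [ih j, runSpec_cons]

lemma pvLabels_succ (lst : List (Int × Int × String)) (s r : Nat) :
    pvLabels lst s (r + 1) = some (pvIdx lst s).2.2 :: pvLabels lst (s + 1) r := by
  simp [pvLabels, List.range_succ_eq_map, List.map_map, Function.comp]
  intro a _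
  have h : s + (a + 1) = s + 1 + a := by omega
  rw [h]

lemma inner_eq (lst : List (Int × Int × String)) (md : Int) (an : Bool) (nN li : Nat) :
    ∀ d j (temp : List (Option String)), j + d = nN → li + nN < lst.length →
    innerA lst li nN md an (j + 1) temp =
      (if min (runSpec lst md (li + j)) d = d then temp ++ pvLabels lst (li + j + 1) d
       else if an then
         temp ++ pvLabels lst (li + j + 1) (min (runSpec lst md (li + j)) d)
              ++ List.replicate (d - min (runSpec lst md (li + j)) d) none
       else temp ++ pvLabels lst (li + j + 1) (min (runSpec lst md (li + j)) d)) := by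
  intro d
  induction d with
  | zero =>
    intro j temp hj hlen
    unfold innerA
    rw [dif_neg (by omega)]
    simp [pvLabels]
  | succ d ih =>
    intro j temp hj hlen
    have hidx : li + (j + 1) - 1 = li + j := by omega
    have hidx2 : li + (j + 1) = li + j + 1 := by omega
    have hrun : runSpec lst md (li + j)
        = (if (pvIdx lst (li + j + 1)).1 - (pvIdx lst (li + j)).2.1 ≤ md
           then runSpec lst md (li + j + 1) + 1 else 0) := by
      conv_lhs => rw [runSpec]
      rw [dif_pos (by omega)]
    unfold innerA
    rw [dif_pos (by omega), hidx, hidx2]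
    rcases em ((pvIdx lst (li + j + 1)).1 - (pvIdx lst (li + j)).2.1 ≤ md) with hg | hg
    · rw [if_pos hg]
      have hrun' : runSpec lst md (li + j) = runSpec lst md (li + j + 1) + 1 := by
        rw [hrun, if_pos hg]
      rw [ih (j + 1) _ (by omega) hlen]
      simp only [hidx2]
      set s := runSpec lst md (li + j + 1) with hs
      have hmin : min (runSpec lst md (li + j)) (d + 1) = min s d + 1 := by
        rw [hrun']; omega
      rw [hmin]
      rcases em (min s d = d) with he | he
      · rw [if_pos he, if_pos (show min s d + 1 = d + 1 by omega), pvLabels_succ]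
        simp
      · rw [if_neg he, if_neg (show ¬ min s d + 1 = d + 1 by omega)]
        have hrep : d + 1 - (min s d + 1) = d - min s d := by omega
        rw [hrep, pvLabels_succ]
        cases an
        · simp only [Bool.false_eq_true, if_false]
          simp
        · simp only [if_true]
          simp
    · rw [if_neg hg]
      have hrun0 : runSpec lst md (li + j) = 0 := by rw [hrun, if_neg hg]
      rw [hrun0]
      rw [if_neg (show ¬ min 0 (d + 1) = d + 1 by omega)]
      have hrepn : nN - (j + 1) + 1 = d + 1 := by omega
      rw [hrepn]
      cases an <;> simp [pvLabels]

lemma pvLabels_length (lst : List (Int × Int × String)) (s r : Nat) :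
    (pvLabels lst s r).length = r := by simp [pvLabels]

lemma step_eq (lst : List (Int × Int × String)) (n md : Int) (an : Bool) (hn : 0 ≤ n)
    (l : Int) (hl0 : 0 ≤ l) (hl : l < (lst.length : Int) - n)
    (dct : PySem.Dict String (List (List (Option String)))) :
    (let li := l.toNat
     let lab := (pvIdx lst li).2.2
     let dct := if PySem.Dict.contains dct lab then dct else PySem.Dict.insert dct lab []
     let temp := innerA lst li n.toNat md an 1 []
     if (temp.length : Int) = n then PySem.Dict.modify dct lab [] (fun v => v ++ [temp]) else dct)
    = (let li := l.toNat
       let lab := (pvIdx lst li).2.2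
       let dct := PySem.Dict.setdefault dct lab []
       let r := min ((runTable lst md).getD li 0) n.toNat
       if r = n.toNat then
         PySem.Dict.modify dct lab [] (fun v => v ++ [pvLabels lst (li + 1) n.toNat])
       else if an then
         PySem.Dict.modify dct lab [] (fun v => v ++ [pvLabels lst (li + 1) r ++ List.replicate (n.toNat - r) none])
       else dct) := by
  set li := l.toNat with hli
  set nN := n.toNat with hnN
  have hA : (if PySem.Dict.contains dct (pvIdx lst li).2.2 then dct
             else PySem.Dict.insert dct (pvIdx lst li).2.2 [])
      = PySem.Dict.setdefault dct (pvIdx lst li).2.2 [] := by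
    rcases h : PySem.Dict.contains dct (pvIdx lst li).2.2 with _ | _
    · rw [if_neg (by simp), PySem.Dict.setdefault_of_not_contains _ _ h]
    · rw [if_pos (by simp), PySem.Dict.setdefault_of_contains _ _ h]
  have hlen : li + nN < lst.length := by omega
  have htemp := inner_eq lst md an nN li nN 0 [] (by omega) hlen
  simp only [Nat.add_zero, List.nil_append] at htemp
  have hcast : ∀ m : Nat, ((m : Int) = n) ↔ (m = nN) := by intro m; omega
  simp only [hA, runTable_getD]
  set r := min (runSpec lst md li) nN with hr
  rcases em (r = nN) with he | he
  · rw [if_pos he]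
    rw [if_pos he] at htemp
    rw [htemp, if_pos (by simp only [pvLabels_length]; omega)]
  · rw [if_neg he]
    rw [if_neg he] at htemp
    cases an with
    | true =>
      simp only [if_true] at htemp ⊢
      rw [htemp, if_pos (by simp only [List.length_append, pvLabels_length,
        List.length_replicate]; omega)]
    | false =>
      simp only [Bool.false_eq_true, if_false] at htemp ⊢
      rw [htemp, if_neg (by simp only [pvLabels_length]; omega)]

-- ===== VERDICT (by name: the statement is the Claim_ definition above) =====
theorem get_next_n_exp_spec : Claim_equal_get_next_n_exp := by
  intro lst n md an _ hpre
  unfold Spec_get_next_n_exp get_next_n_exp get_next_n_exp_alt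
  congr 1
  apply PySem.List.foldl_congr_mem
  intro dct l hl
  rw [PySem.List.mem_pyRange_one] at hl
  exact step_eq lst n md an hpre l hl.1 hl.2 dct
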